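-- pv_equiv track=rewrite | github.com/sumehta/bilstm_crf_extract | predict.py | tokens_from_tags
-- ===== SOURCE A (Python) =====
-- def tokens_from_tags(sentences, tags_list, begin_tags):
--     """extract entities from tags
--
--     :param sentences: a list of sentence
--     :param tags_list: a list of tags
--     :param begin_tags:
--     :return:
--     """
--     if not tags_list:
--         return []
--
--     def _tokens(sentence, ts):
--         actors = []
--         targets = []
--         for i in range(len(ts)):
--             if 'B-ACT' in ts[i]:
--                 j = i+1
--                 while j < len(ts) and 'ACT' in ts[j]:
--                     j+=1
--                 actors.append((' '.join(sentence[i:j]), ' '.join(ts[i:j])))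
--
--         for i in range(len(ts)):
--             if 'B-TARG' in ts[i] or 'I-TARG' in ts[i]:
--                 j = i+1
--                 while j < len(ts) and 'TARG' in ts[j]:
--                     j+=1
--                 targets.append((' '.join(sentence[i:j]), ' '.join(ts[i:j])))
--
--         return (actors, targets)
--
--     tokens_list = [_tokens(sentence, ts) for sentence, ts in zip(sentences, tags_list)]
--     return tokens_list
-- ===== SOURCE B (Python) =====
-- def tokens_from_tags(sentences, tags_list, begin_tags):
--     """Single forward sweep per sentence and entity kind: currently-open spans
--     are kept as accumulators, extended token by token and all closed together
--     at the first non-matching tag, instead of rescanning ahead from every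
--     begin tag."""
--     def _sweep(sentence, ts, key, begins):
--         done, open_spans = [], []
--         for i, t in enumerate(ts):
--             w = sentence[i] if i < len(sentence) else None
--             if key in t:
--                 for ws, tg in open_spans:
--                     if w is not None:
--                         ws.append(w)
--                     tg.append(t)
--             else:
--                 done.extend((' '.join(ws), ' '.join(tg)) for ws, tg in open_spans)
--                 open_spans = []
--             if any(b in t for b in begins):
--                 open_spans.append(([w] if w is not None else [], [t]))
--         done.extend((' '.join(ws), ' '.join(tg)) for ws, tg in open_spans)
--         return done
--     return [(_sweep(s, ts, 'ACT', ['B-ACT']), _sweep(s, ts, 'TARG', ['B-TARG', 'I-TARG']))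
--             for s, ts in zip(sentences, tags_list)]
-- ===== Notes on version B (the rewrite author's own statement) =====
-- stated objective: alternative
-- what changed: Replaces A's per-begin forward rescans (an inner while-loop plus slicing from each begin tag) with a single forward sweep per sentence and entity kind that keeps the currently-open spans as accumulators, extending them token by token and closing them all at the first non-matching tag.
import Mathlib
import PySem

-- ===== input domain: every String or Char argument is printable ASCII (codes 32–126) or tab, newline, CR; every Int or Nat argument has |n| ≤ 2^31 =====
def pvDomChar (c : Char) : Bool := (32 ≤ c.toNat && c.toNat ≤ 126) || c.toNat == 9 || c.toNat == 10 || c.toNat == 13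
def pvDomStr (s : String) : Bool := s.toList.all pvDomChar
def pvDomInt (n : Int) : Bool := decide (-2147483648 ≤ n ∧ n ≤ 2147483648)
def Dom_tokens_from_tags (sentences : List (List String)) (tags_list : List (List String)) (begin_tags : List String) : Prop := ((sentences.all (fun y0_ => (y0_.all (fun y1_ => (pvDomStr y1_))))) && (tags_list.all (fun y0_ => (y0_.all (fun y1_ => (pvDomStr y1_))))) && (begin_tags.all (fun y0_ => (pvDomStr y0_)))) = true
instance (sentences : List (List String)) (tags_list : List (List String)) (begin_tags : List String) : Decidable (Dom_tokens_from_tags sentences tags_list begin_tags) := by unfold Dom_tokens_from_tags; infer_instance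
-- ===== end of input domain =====

-- B replaces A's per-begin forward rescans by one forward sweep per sentence and entity
-- kind that keeps the currently-open spans as accumulators (objective: alternative).

-- ===== PORT A =====
-- the inner `while j < len(ts) and key in ts[j]: j += 1` loop, returning the final j
def pvFindEnd (key : String) (ts : List String) (j : Nat) : Nat :=
  if _h : j < ts.length ∧ PySem.Str.isIn key (ts.getD j "") then
    pvFindEnd key ts (j + 1)
  else j
termination_by ts.length - j
decreasing_by omega

def pvTokensA (sentence ts : List String) : (List (String × String)) × (List (String × String)) :=
  let actors := (List.range ts.length).foldl (fun acc i =>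
    if PySem.Str.isIn "B-ACT" (ts.getD i "") then
      let j := pvFindEnd "ACT" ts (i + 1)
      acc ++ [(PySem.Str.join " " (PySem.List.slice sentence (some (i : Int)) (some (j : Int))),
               PySem.Str.join " " (PySem.List.slice ts (some (i : Int)) (some (j : Int))))]
    else acc) []
  let targets := (List.range ts.length).foldl (fun acc i =>
    if PySem.Str.isIn "B-TARG" (ts.getD i "") || PySem.Str.isIn "I-TARG" (ts.getD i "") then
      let j := pvFindEnd "TARG" ts (i + 1)
      acc ++ [(PySem.Str.join " " (PySem.List.slice sentence (some (i : Int)) (some (j : Int))),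
               PySem.Str.join " " (PySem.List.slice ts (some (i : Int)) (some (j : Int))))]
    else acc) []
  (actors, targets)

def tokens_from_tags (sentences : List (List String)) (tags_list : List (List String)) (begin_tags : List String) : List ((List (String × String)) × (List (String × String))) :=
  if tags_list = [] then []
  else (sentences.zip tags_list).map (fun p => pvTokensA p.1 p.2)

-- ===== PORT B =====
-- (' '.join(ws), ' '.join(tg)) for a finished span
def pvMk (p : List String × List String) : String × String :=
  (PySem.Str.join " " p.1, PySem.Str.join " " p.2)

-- Source B's `_sweep` loop over `enumerate(ts)`: `done` = finished spans, `opens` = open spans;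
-- `sentence[i] if i < len(sentence) else None` is `s[i]?` (exact: in-range get, else none)
def pvSweep (key : String) (begins : List String) (s : List String) (i : Nat) (rs : List String)
    (done : List (String × String)) (opens : List (List String × List String)) :
    List (String × String) :=
  match rs with
  | [] => done ++ opens.map pvMk
  | t :: rest =>
    let w := s[i]?
    let st :=
      if PySem.Str.isIn key t then
        (done, opens.map (fun p => (p.1 ++ w.toList, p.2 ++ [t])))
      else
        (done ++ opens.map pvMk, ([] : List (List String × List String)))
    let opens' := if begins.any (fun b => PySem.Str.isIn b t) then st.2 ++ [(w.toList, [t])] else st.2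
    pvSweep key begins s (i + 1) rest st.1 opens'

def tokens_from_tags_alt (sentences : List (List String)) (tags_list : List (List String)) (begin_tags : List String) : List ((List (String × String)) × (List (String × String))) :=
  (sentences.zip tags_list).map (fun p =>
    (pvSweep "ACT" ["B-ACT"] p.1 0 p.2 [] [],
     pvSweep "TARG" ["B-TARG", "I-TARG"] p.1 0 p.2 [] []))

-- ===== PRECONDITION & SPEC =====
def Spec_tokens_from_tags (sentences : List (List String)) (tags_list : List (List String)) (begin_tags : List String) (out : List ((List (String × String)) × (List (String × String)))) : Prop := out = tokens_from_tags_alt sentences tags_list begin_tags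
instance (sentences : List (List String)) (tags_list : List (List String)) (begin_tags : List String) (out : List ((List (String × String)) × (List (String × String)))) : Decidable (Spec_tokens_from_tags sentences tags_list begin_tags out) := by unfold Spec_tokens_from_tags; infer_instance

-- ===== CLAIM (what is proved, stated in full; the proofs are below) =====
def Claim_equal_tokens_from_tags : Prop := ∀ (sentences : List (List String)) (tags_list : List (List String)) (begin_tags : List String), Dom_tokens_from_tags sentences tags_list begin_tags → Spec_tokens_from_tags sentences tags_list begin_tags (tokens_from_tags sentences tags_list begin_tags)

-- ===== LEMMAS AND PROOFS =====

-- common specification of one kind's span list: a begin at absolute index i spans the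
-- token there plus the maximal run of key-containing tags after it
def pvSpec (key : String) (bp : String → Bool) (s : List String) (i : Nat) : List String → List (String × String)
  | [] => []
  | t :: rest =>
    let tw := rest.takeWhile (fun u => PySem.Str.isIn key u)
    (if bp t then [pvMk ((s.drop i).take (tw.length + 1), t :: tw)] else []) ++
      pvSpec key bp s (i + 1) rest

-- clean spec of pvFindEnd's result: scan the suffix starting at absolute index j
def pvRun (key : String) (j : Nat) (ts : List String) : Nat :=
  match ts with
  | [] => j
  | t :: rest => if PySem.Str.isIn key t then pvRun key (j + 1) rest else j

theorem pvFindEnd_eq_run (key : String) (ts : List String) (j : Nat) (hj : j ≤ ts.length) :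
    pvFindEnd key ts j = pvRun key j (ts.drop j) := by
  have main : ∀ n j, j ≤ ts.length → ts.length - j ≤ n →
      pvFindEnd key ts j = pvRun key j (ts.drop j) := by
    intro n
    induction n with
    | zero =>
      intro j hj hn
      have hje : j = ts.length := by omega
      subst hje
      rw [pvFindEnd]
      simp [pvRun]
    | succ n ih =>
      intro j hj hn
      rw [pvFindEnd]
      by_cases hlt : j < ts.length
      · have hdrop : ts.drop j = ts[j] :: ts.drop (j + 1) := List.drop_eq_getElem_cons hlt
        have hget : ts.getD j "" = ts[j] := List.getD_eq_getElem ts "" hlt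
        rw [hdrop, pvRun, hget]
        by_cases hin : PySem.Str.isIn key ts[j] = true
        · simp only [hlt, hin, and_self, if_pos, dif_pos]
          exact ih (j + 1) (by omega) (by omega)
        · rw [dif_neg (fun h => hin h.2), if_neg hin]
      · have hje : j = ts.length := by omega
        subst hje
        simp [pvRun]
  exact main (ts.length - j) j hj (le_refl _)

theorem pvRun_eq (key : String) (l : List String) (j : Nat) :
    pvRun key j l = j + (l.takeWhile (fun u => PySem.Str.isIn key u)).length := by
  induction l generalizing j with
  | nil => simp [pvRun]
  | cons t rest ih =>
    rw [pvRun]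
    by_cases h : PySem.Str.isIn key t = true
    · rw [if_pos h, List.takeWhile_cons_of_pos (p := fun u => PySem.Str.isIn key u) h, ih, List.length_cons]
      omega
    · rw [if_neg h, List.takeWhile_cons_of_neg (by simpa using h)]
      simp

theorem pvStepWords (s : List String) (i m : Nat) :
    (s[i]?).toList ++ (s.drop (i + 1)).take m = (s.drop i).take (m + 1) := by
  by_cases h : i < s.length
  · rw [List.getElem?_eq_getElem h, List.drop_eq_getElem_cons h]
    rfl
  · have h1 : s.drop i = [] := List.drop_eq_nil_of_le (by omega)
    have h2 : s.drop (i + 1) = [] := List.drop_eq_nil_of_le (by omega)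
    rw [List.getElem?_eq_none (by omega), h1, h2]
    simp

-- B's sweep computes: the finished spans, then the open spans each extended by the maximal
-- key-run prefix of the remaining tags, then the spans begun in the remaining tags
theorem pvSweep_eq (key : String) (begins : List String)
    (hbp : ∀ t, begins.any (fun b => PySem.Str.isIn b t) = true → PySem.Str.isIn key t = true)
    (s : List String) :
    ∀ (rs : List String) (i : Nat) (done : List (String × String))
      (opens : List (List String × List String)),
      pvSweep key begins s i rs done opens =
        done ++
          (opens.map (fun p =>
            pvMk (p.1 ++ (s.drop i).take (rs.takeWhile (fun u => PySem.Str.isIn key u)).length,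
                  p.2 ++ rs.takeWhile (fun u => PySem.Str.isIn key u)))) ++
          pvSpec key (fun t => begins.any (fun b => PySem.Str.isIn b t)) s i rs := by
  intro rs
  induction rs with
  | nil =>
    intro i done opens
    simp [pvSweep, pvSpec, pvMk]
  | cons t rest ih =>
    intro i done opens
    rw [pvSweep]
    have hmap : ∀ p : List String × List String,
        (fun p => pvMk (p.1 ++ (List.drop (i+1) s).take (rest.takeWhile (fun u => PySem.Str.isIn key u)).length,
                        p.2 ++ rest.takeWhile (fun u => PySem.Str.isIn key u)))
          ((fun p => (p.1 ++ (s[i]?).toList, p.2 ++ [t])) p)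
        = pvMk (p.1 ++ (List.drop i s).take ((rest.takeWhile (fun u => PySem.Str.isIn key u)).length + 1),
                p.2 ++ t :: rest.takeWhile (fun u => PySem.Str.isIn key u)) := by
      intro p
      simp only [List.append_assoc, pvStepWords]
      rfl
    have h1 : (opens.map (fun p => (p.1 ++ (s[i]?).toList, p.2 ++ [t]))).map
        (fun p => pvMk (p.1 ++ (List.drop (i+1) s).take (rest.takeWhile (fun u => PySem.Str.isIn key u)).length,
                        p.2 ++ rest.takeWhile (fun u => PySem.Str.isIn key u)))
        = opens.map (fun p =>
            pvMk (p.1 ++ (List.drop i s).take ((rest.takeWhile (fun u => PySem.Str.isIn key u)).length + 1),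
                  p.2 ++ t :: rest.takeWhile (fun u => PySem.Str.isIn key u))) := by
      rw [List.map_map]
      exact List.map_congr_left (fun p _ => hmap p)
    have h2 : List.map
        (fun p => pvMk (p.1 ++ (List.drop (i+1) s).take (rest.takeWhile (fun u => PySem.Str.isIn key u)).length,
                        p.2 ++ rest.takeWhile (fun u => PySem.Str.isIn key u)))
        [((s[i]?).toList, [t])]
        = [pvMk ((List.drop i s).take ((rest.takeWhile (fun u => PySem.Str.isIn key u)).length + 1),
                 t :: rest.takeWhile (fun u => PySem.Str.isIn key u))] := by
      simp only [List.map_cons, List.map_nil]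
      rw [pvStepWords]
      rfl
    by_cases hk : PySem.Str.isIn key t = true
    · simp only [hk, if_pos, List.takeWhile_cons_of_pos (p := fun u => PySem.Str.isIn key u) hk, List.length_cons]
      rw [pvSpec]
      by_cases hb : (begins.any (fun b => PySem.Str.isIn b t)) = true
      · simp only [hb, if_pos]
        rw [ih, List.map_append, h1, h2]
        simp only [List.append_assoc, List.singleton_append]
      · simp only [hb, Bool.false_eq_true, if_false]
        rw [ih, h1]
        simp only [List.nil_append]
    · have hb : (begins.any (fun b => PySem.Str.isIn b t)) = false := by
        by_contra hcon
        exact absurd (hbp t (by simpa using hcon)) (by simpa using hk)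
      simp only [hk, Bool.false_eq_true, if_false, hb]
      rw [ih, pvSpec, List.takeWhile_cons_of_neg (by simpa using hk)]
      simp only [hb, Bool.false_eq_true, if_false, List.take_zero, List.length_nil,
        List.map_nil, List.append_nil, List.nil_append]

-- A's per-kind filtered index map equals the common spec
theorem pvAside (key : String) (bpd : String → Bool) (s ts : List String) :
    ∀ (rs : List String) (i : Nat), rs = ts.drop i →
      ((List.range rs.length).filter (fun k => bpd (ts.getD (i + k) ""))).map
        (fun k =>
          (PySem.Str.join " " (PySem.List.slice s (some ((i + k : Nat) : Int)) (some ((pvFindEnd key ts (i + k + 1) : Nat) : Int))),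
           PySem.Str.join " " (PySem.List.slice ts (some ((i + k : Nat) : Int)) (some ((pvFindEnd key ts (i + k + 1) : Nat) : Int)))))
      = pvSpec key bpd s i rs := by
  intro rs
  induction rs with
  | nil => intro i h; simp [pvSpec]
  | cons t rest ih =>
    intro i h
    have hlt : i < ts.length := by
      by_contra hge
      rw [List.drop_eq_nil_of_le (by omega)] at h
      exact List.cons_ne_nil _ _ h
    have hcons : ts.drop i = ts[i] :: ts.drop (i + 1) := List.drop_eq_getElem_cons hlt
    rw [hcons] at h
    obtain ⟨ht, hrest⟩ := List.cons_eq_cons.mp h.symm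
    have hget : ts.getD i "" = t := by rw [List.getD_eq_getElem ts "" hlt, ht]
    have hfe : pvFindEnd key ts (i + 1) = (i + 1) + (rest.takeWhile (fun u => PySem.Str.isIn key u)).length := by
      rw [pvFindEnd_eq_run key ts (i + 1) (by omega), ← hrest, pvRun_eq]
    rw [pvSpec, List.length_cons, List.range_succ_eq_map, List.filter_cons,
        List.filter_map]
    have harith : ∀ k : Nat, i + (k + 1) = (i + 1) + k := by omega
    have hmapped :
        ((List.filter (fun k => bpd (ts.getD (i + 1 + k) "")) (List.range rest.length)).map Nat.succ).map
          (fun k =>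
            (PySem.Str.join " " (PySem.List.slice s (some ((i + k : Nat) : Int)) (some ((pvFindEnd key ts (i + k + 1) : Nat) : Int))),
             PySem.Str.join " " (PySem.List.slice ts (some ((i + k : Nat) : Int)) (some ((pvFindEnd key ts (i + k + 1) : Nat) : Int)))))
        = pvSpec key bpd s (i + 1) rest := by
      rw [List.map_map, ← ih (i + 1) hrest.symm]
      apply List.map_congr_left
      intro k _
      simp only [Function.comp, Nat.succ_eq_add_one]
      rw [show i + (k + 1) = i + 1 + k from by omega]
    have hpred : ((fun k => bpd (ts.getD (i + k) "")) ∘ Nat.succ) = (fun k => bpd (ts.getD (i + 1 + k) "")) := by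
      funext k
      simp only [Function.comp, Nat.succ_eq_add_one]
      rw [harith k]
    rw [hpred, Nat.add_zero, hget]
    by_cases hbt : bpd t = true
    · rw [if_pos hbt, if_pos hbt, List.map_cons, hmapped, List.singleton_append]
      congr 1
      have hsl : ∀ (l : List String),
          PySem.List.slice l (some ((i : Nat) : Int)) (some ((pvFindEnd key ts (i + 1) : Nat) : Int))
          = (l.drop i).take ((rest.takeWhile (fun u => PySem.Str.isIn key u)).length + 1) := by
        intro l
        rw [hfe, PySem.List.slice_natCast]
        congr 1
        omega
      have hts : (ts.drop i).take ((rest.takeWhile (fun u => PySem.Str.isIn key u)).length + 1)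
          = t :: rest.takeWhile (fun u => PySem.Str.isIn key u) := by
        rw [hcons, ht, List.take_succ_cons, hrest]
        congr 1
        exact (List.prefix_iff_eq_take.mp (List.takeWhile_prefix _)).symm
      simp only [Nat.add_zero, hsl, hts]
      rfl
    · rw [if_neg hbt, if_neg hbt, List.nil_append, hmapped]
theorem pvBeginACT : ∀ t : String, (["B-ACT"].any (fun b => PySem.Str.isIn b t)) = true → PySem.Str.isIn "ACT" t = true := by
  intro t h
  simp only [List.any_cons, List.any_nil, Bool.or_false] at h
  rw [PySem.Str.isIn_iff_infix] at h ⊢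
  exact List.IsInfix.trans (by decide) h

theorem pvBeginTARG : ∀ t : String, (["B-TARG", "I-TARG"].any (fun b => PySem.Str.isIn b t)) = true → PySem.Str.isIn "TARG" t = true := by
  intro t h
  simp only [List.any_cons, List.any_nil, Bool.or_false, Bool.or_eq_true] at h
  rw [PySem.Str.isIn_iff_infix] at ⊢
  rcases h with h | h
  · rw [PySem.Str.isIn_iff_infix] at h
    exact List.IsInfix.trans (by decide) h
  · rw [PySem.Str.isIn_iff_infix] at h
    exact List.IsInfix.trans (by decide) h

theorem pvTokens_eq (s ts : List String) :
    pvTokensA s ts =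
      (pvSweep "ACT" ["B-ACT"] s 0 ts [] [], pvSweep "TARG" ["B-TARG", "I-TARG"] s 0 ts [] []) := by
  rw [pvSweep_eq "ACT" ["B-ACT"] pvBeginACT s ts 0 [] [],
      pvSweep_eq "TARG" ["B-TARG", "I-TARG"] pvBeginTARG s ts 0 [] []]
  simp only [List.map_nil, List.nil_append, List.append_nil]
  unfold pvTokensA
  simp only [PySem.List.foldl_append_if]
  have hA := pvAside "ACT" (fun x => PySem.Str.isIn "B-ACT" x) s ts ts 0 (by simp)
  have hT := pvAside "TARG" (fun x => PySem.Str.isIn "B-TARG" x || PySem.Str.isIn "I-TARG" x) s ts ts 0 (by simp)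
  simp only [Nat.zero_add] at hA hT
  rw [List.nil_append, List.nil_append, hA, hT]
  have eA : (fun t => List.any ["B-ACT"] fun b => PySem.Str.isIn b t) = (fun x => PySem.Str.isIn "B-ACT" x) := by
    funext t
    simp only [List.any_cons, List.any_nil, Bool.or_false]
  have eT : (fun t => List.any ["B-TARG", "I-TARG"] fun b => PySem.Str.isIn b t) = (fun x => PySem.Str.isIn "B-TARG" x || PySem.Str.isIn "I-TARG" x) := by
    funext t
    simp only [List.any_cons, List.any_nil, Bool.or_false]
  rw [eA, eT]

-- ===== VERDICT (by name: the statement is the Claim_ definition above) =====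
theorem tokens_from_tags_spec : Claim_equal_tokens_from_tags := by
  intro sentences tags_list begin_tags _
  show tokens_from_tags sentences tags_list begin_tags = tokens_from_tags_alt sentences tags_list begin_tags
  unfold tokens_from_tags tokens_from_tags_alt
  by_cases h : tags_list = []
  · simp [h]
  · rw [if_neg h]
    apply List.map_congr_left
    rintro ⟨s, ts⟩ _
    exact pvTokens_eq s ts
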